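-- pv_equiv track=rewrite | github.com/krishchopra/advent-of-code-2025 | parth/day4/solution_pt_2.py | remove_accessible_rows_and_return_count
-- ===== SOURCE A (Python) =====
-- def is_accessible(r, c, grid):
--     num_adjacent_rolls = 0
--     dirs = [(-1, 0), (1, 0), (0, -1), (0, 1), (-1, -1), (-1, 1), (1, -1), (1, 1)]
--     for dr, dc in dirs:
--         nr, nc = r + dr, c + dc
--         if 0 <= nr < len(grid) and 0 <= nc < len(grid[0]):
--             if grid[nr][nc] == "@":
--                 num_adjacent_rolls += 1
--     return num_adjacent_rolls < 4
--
-- def remove_accessible_rows_and_return_count(grid):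
--     count = 0
--     for r in range(len(grid)):
--         for c in range(len(grid[0])):
--             if grid[r][c] == "@" and is_accessible(r, c, grid):
--                 grid[r][c] = "."
--                 count += 1
--     return (grid, count)
-- ===== SOURCE B (Python) =====
-- NEIGH = [(-1, -1), (-1, 0), (-1, 1), (0, -1), (0, 1), (1, -1), (1, 0), (1, 1)]
--
-- def remove_accessible_rows_and_return_count(grid):
--     if not grid:
--         return (grid, 0)
--     h, w = len(grid), len(grid[0])
--
--     def nbrs(r, c):
--         return [(r + dr, c + dc) for dr, dc in NEIGH
--                 if 0 <= r + dr < h and 0 <= c + dc < w]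
--
--     # cnt[r][c] = number of '@' among the 8 neighbors of (r, c) in the original grid
--     cnt = [[len([p for p in nbrs(r, c) if grid[p[0]][p[1]] == "@"])
--             for c in range(w)] for r in range(h)]
--     count = 0
--     for r in range(h):
--         for c in range(w):
--             if grid[r][c] == "@" and cnt[r][c] < 4:
--                 grid[r][c] = "."
--                 count += 1
--                 for (nr, nc) in nbrs(r, c):
--                     cnt[nr][nc] -= 1
--     return (grid, count)
-- ===== Notes on version B (the rewrite author's own statement) =====
-- stated objective: alternative
-- what changed: A re-scans the 8 neighbours of every '@' cell in the mutated grid on each test; B precomputes a parallel neighbour-count table once and maintains it incrementally (decrementing neighbours' entries at each removal), so the per-cell test is a table lookup.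
import Mathlib
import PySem

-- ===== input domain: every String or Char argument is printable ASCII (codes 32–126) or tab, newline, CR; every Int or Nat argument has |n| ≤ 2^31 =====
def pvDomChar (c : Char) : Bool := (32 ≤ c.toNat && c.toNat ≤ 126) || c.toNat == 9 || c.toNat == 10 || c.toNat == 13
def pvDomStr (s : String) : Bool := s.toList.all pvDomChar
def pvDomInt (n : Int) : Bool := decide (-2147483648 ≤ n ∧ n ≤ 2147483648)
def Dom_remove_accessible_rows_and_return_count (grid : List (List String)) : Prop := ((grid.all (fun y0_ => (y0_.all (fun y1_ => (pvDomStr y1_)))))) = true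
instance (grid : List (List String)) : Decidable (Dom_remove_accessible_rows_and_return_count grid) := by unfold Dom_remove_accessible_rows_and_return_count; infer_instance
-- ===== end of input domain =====

-- B replaces A's per-cell rescan of the mutated grid by a precomputed neighbour-count
-- table that is decremented incrementally at each removal (alternative data structure;
-- both Pythons mutate the argument grid in place the same way; the theorems are about
-- the returned value).

-- ===== PORT A =====
def pyDirs : List (Int × Int) := [(-1, 0), (1, 0), (0, -1), (0, 1), (-1, -1), (-1, 1), (1, -1), (1, 1)]

-- num_adjacent_rolls accumulator of is_accessible (indices are guarded in range,
-- so getD after the bounds test is exactly Python's grid[nr][nc])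
def numAdjacentRolls (r c : Int) (grid : List (List String)) : Int :=
  pyDirs.foldl (fun acc dd =>
    let nr := r + dd.1
    let nc := c + dd.2
    if 0 ≤ nr ∧ nr < (grid.length : Int) ∧ 0 ≤ nc ∧ nc < ((grid.headD []).length : Int) then
      (if (grid.getD nr.toNat []).getD nc.toNat "" = "@" then acc + 1 else acc)
    else acc) 0

def is_accessible (r c : Int) (grid : List (List String)) : Bool :=
  decide (numAdjacentRolls r c grid < 4)

def remove_accessible_rows_and_return_count (grid : List (List String)) : List (List String) × Int :=
  (List.range grid.length).foldl (fun st r =>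
    (List.range (st.1.headD []).length).foldl (fun st (c : Nat) =>
      if (st.1.getD r []).getD c "" = "@" ∧ is_accessible (r : Int) (c : Int) st.1 then
        (st.1.set r ((st.1.getD r []).set c "."), st.2 + 1)
      else st) st) (grid, 0)

-- ===== PORT B =====
def neighOffsets : List (Int × Int) := [(-1, -1), (-1, 0), (-1, 1), (0, -1), (0, 1), (1, -1), (1, 0), (1, 1)]

-- [(r+dr, c+dc) for dr, dc in NEIGH if in bounds]
def altNbrs (h w r c : Nat) : List (Int × Int) :=
  (neighOffsets.filter (fun dd =>
      0 ≤ (r : Int) + dd.1 ∧ (r : Int) + dd.1 < (h : Int) ∧ 0 ≤ (c : Int) + dd.2 ∧ (c : Int) + dd.2 < (w : Int))).map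
    (fun dd => ((r : Int) + dd.1, (c : Int) + dd.2))

-- cnt[r][c] = number of '@' among the neighbours of (r,c) in the original grid
def altCnt (grid : List (List String)) (h w : Nat) : List (List Int) :=
  (List.range h).map (fun r => (List.range w).map (fun c =>
    (((altNbrs h w r c).filter (fun p => (grid.getD p.1.toNat []).getD p.2.toNat "" = "@")).length : Int)))

-- for (nr, nc) in nbrs(r, c): cnt[nr][nc] -= 1   (positions are in bounds by construction)
def altDec (cnt : List (List Int)) (ps : List (Int × Int)) : List (List Int) :=
  ps.foldl (fun m p =>
    m.set p.1.toNat ((m.getD p.1.toNat []).set p.2.toNat ((m.getD p.1.toNat []).getD p.2.toNat 0 - 1))) cnt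

def remove_accessible_rows_and_return_count_alt (grid : List (List String)) : List (List String) × Int :=
  if grid = [] then (grid, 0) else
    let h := grid.length
    let w := (grid.headD []).length
    let st := (List.range h).foldl (fun st r =>
      (List.range w).foldl (fun st (c : Nat) =>
        if (st.1.getD r []).getD c "" = "@" ∧ (st.2.1.getD r []).getD c 0 < 4 then
          (st.1.set r ((st.1.getD r []).set c "."), altDec st.2.1 (altNbrs h w r c), st.2.2 + 1)
        else st) st) (grid, altCnt grid h w, (0 : Int))
    (st.1, st.2.2)

-- ===== PRECONDITION & SPEC =====
-- Pre_ excludes grids with a row shorter than the first row: there Python A raises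
-- IndexError (it indexes every row up to len(grid[0])).
def Pre_remove_accessible_rows_and_return_count (grid : List (List String)) : Prop :=
  ∀ row ∈ grid, (grid.headD []).length ≤ row.length
instance (grid : List (List String)) : Decidable (Pre_remove_accessible_rows_and_return_count grid) := by unfold Pre_remove_accessible_rows_and_return_count; infer_instance

def pvWitness_remove_accessible_rows_and_return_count : List (List String) :=
  [["@", "@", "."], [".", "@", "@"], ["@", ".", "."]]

def Spec_remove_accessible_rows_and_return_count (grid : List (List String)) (out : List (List String) × Int) : Prop := out = remove_accessible_rows_and_return_count_alt grid
instance (grid : List (List String)) (out : List (List String) × Int) : Decidable (Spec_remove_accessible_rows_and_return_count grid out) := by unfold Spec_remove_accessible_rows_and_return_count; infer_instance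

-- ===== CLAIM (what is proved, stated in full; the proofs are below) =====
def Claim_equal_remove_accessible_rows_and_return_count : Prop := ∀ (grid : List (List String)), Dom_remove_accessible_rows_and_return_count grid → Pre_remove_accessible_rows_and_return_count grid → Spec_remove_accessible_rows_and_return_count grid (remove_accessible_rows_and_return_count grid)

-- ===== LEMMAS AND PROOFS =====

-- 2-D read with default, and the write both ports perform
def gget {α : Type} (g : List (List α)) (d : α) (a b : Nat) : α := (g.getD a []).getD b d
def gset {α : Type} (g : List (List α)) (i j : Nat) (v : α) : List (List α) :=
  g.set i ((g.getD i []).set j v)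

-- "(a,b) is one of the 8 neighbours of (r,c)"
def NbrP (r c a b : Nat) : Bool :=
  decide (((a : Int) ≤ r + 1) ∧ ((r : Int) ≤ a + 1) ∧ ((b : Int) ≤ c + 1) ∧ ((c : Int) ≤ b + 1) ∧ ¬(a = r ∧ b = c))

theorem getD_set {α : Type} (l : List α) (i j : Nat) (x d : α) :
    (l.set i x).getD j d = if j = i ∧ i < l.length then x else l.getD j d := by
  simp [List.getD_eq_getElem?_getD, List.getElem?_set]
  split_ifs with h1 h2 h3 <;> simp_all

theorem gget_gset {α : Type} (g : List (List α)) (d : α) (i j a b : Nat) (v : α) :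
    gget (gset g i j v) d a b =
      if a = i ∧ b = j ∧ i < g.length ∧ j < (g.getD i []).length then v else gget g d a b := by
  unfold gget gset
  rw [getD_set]
  by_cases h1 : a = i ∧ i < g.length
  · obtain ⟨rfl, hlen⟩ := h1
    rw [if_pos ⟨rfl, hlen⟩, getD_set]
    by_cases h2 : b = j ∧ j < (g.getD a []).length
    · rw [if_pos ⟨h2.1, h2.2⟩, if_pos ⟨rfl, h2.1, hlen, h2.2⟩]
    · rw [if_neg h2, if_neg (by tauto)]
  · rw [if_neg h1, if_neg (by tauto)]

theorem getD2_gset {α : Type} (g : List (List α)) (d : α) (i j a b : Nat) (v : α) :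
    ((gset g i j v).getD a []).getD b d =
      if a = i ∧ b = j ∧ i < g.length ∧ j < (g.getD i []).length then v else (g.getD a []).getD b d :=
  gget_gset g d i j a b v

theorem gset_length {α : Type} (g : List (List α)) (i j : Nat) (v : α) :
    (gset g i j v).length = g.length := by simp [gset]

theorem gset_row_len {α : Type} (g : List (List α)) (i j : Nat) (v : α) (a : Nat) :
    ((gset g i j v).getD a []).length = (g.getD a []).length := by
  unfold gset; rw [getD_set]; split_ifs with h <;> simp_all

theorem headD_eq_getD {α : Type} (l : List (List α)) : l.headD [] = l.getD 0 [] := by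
  cases l <;> rfl

theorem gset_headD_len {α : Type} (g : List (List α)) (i j : Nat) (v : α) :
    ((gset g i j v).headD []).length = (g.headD []).length := by
  have h1 : (gset g i j v).headD [] = (gset g i j v).getD 0 [] := headD_eq_getD _
  have h2 : g.headD [] = g.getD 0 [] := headD_eq_getD _
  rw [h1, h2, gset_row_len]

-- A's counting fold generalized over the direction list (definitional copy)
def adjF (g : List (List String)) (r c : Int) (acc : Int) (l : List (Int × Int)) : Int :=
  l.foldl (fun acc dd =>
    let nr := r + dd.1
    let nc := c + dd.2
    if 0 ≤ nr ∧ nr < (g.length : Int) ∧ 0 ≤ nc ∧ nc < ((g.headD []).length : Int) then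
      (if (g.getD nr.toNat []).getD nc.toNat "" = "@" then acc + 1 else acc)
    else acc) acc

theorem numAdjacentRolls_eq_adjF (r c : Int) (g : List (List String)) :
    numAdjacentRolls r c g = adjF g r c 0 pyDirs := rfl

theorem adjF_shift (g : List (List String)) (r c : Int) (l : List (Int × Int)) (acc e : Int) :
    adjF g r c (acc + e) l = adjF g r c acc l + e := by
  induction l generalizing acc with
  | nil => rfl
  | cons dd l ih =>
    simp only [adjF, List.foldl_cons]
    have h : ∀ x : Int, (if 0 ≤ r + dd.1 ∧ r + dd.1 < (g.length : Int) ∧ 0 ≤ c + dd.2 ∧ c + dd.2 < ((g.headD []).length : Int) then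
        (if (g.getD (r + dd.1).toNat []).getD (c + dd.2).toNat "" = "@" then x + 1 else x)
      else x) = (if 0 ≤ r + dd.1 ∧ r + dd.1 < (g.length : Int) ∧ 0 ≤ c + dd.2 ∧ c + dd.2 < ((g.headD []).length : Int) then
        (if (g.getD (r + dd.1).toNat []).getD (c + dd.2).toNat "" = "@" then x + 1 else x)
      else x) := fun _ => rfl
    show adjF g r c _ l = adjF g r c _ l + e
    have hs : (if 0 ≤ r + dd.1 ∧ r + dd.1 < (g.length : Int) ∧ 0 ≤ c + dd.2 ∧ c + dd.2 < ((g.headD []).length : Int) then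
        (if (g.getD (r + dd.1).toNat []).getD (c + dd.2).toNat "" = "@" then acc + e + 1 else acc + e)
      else acc + e) = (if 0 ≤ r + dd.1 ∧ r + dd.1 < (g.length : Int) ∧ 0 ≤ c + dd.2 ∧ c + dd.2 < ((g.headD []).length : Int) then
        (if (g.getD (r + dd.1).toNat []).getD (c + dd.2).toNat "" = "@" then acc + 1 else acc)
      else acc) + e := by split_ifs <;> ring
    rw [hs]
    exact ih _

theorem adjF_sub (g : List (List String)) (r c : Int) (l : List (Int × Int)) (acc e : Int) :
    adjF g r c (acc - e) l = adjF g r c acc l - e := by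
  have h := adjF_shift g r c l (acc - e) e
  rw [sub_add_cancel] at h
  linarith

-- A's fold counts matching directions
theorem adjF_count (g : List (List String)) (r c : Int) (l : List (Int × Int)) (acc : Int) :
    adjF g r c acc l = acc + (l.countP (fun dd =>
      decide (0 ≤ r + dd.1 ∧ r + dd.1 < (g.length : Int) ∧ 0 ≤ c + dd.2 ∧ c + dd.2 < ((g.headD []).length : Int)) &&
      decide ((g.getD (r + dd.1).toNat []).getD (c + dd.2).toNat "" = "@")) : Int) := by
  induction l generalizing acc with
  | nil => simp [adjF]
  | cons dd l ih =>
    simp only [adjF, List.foldl_cons, List.countP_cons]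
    show adjF g r c _ l = _
    rw [ih]
    split_ifs <;>
      simp only [Bool.and_eq_true, decide_eq_true_eq] at * <;>
      first
        | (exfalso; tauto)
        | (push_cast; ring)

-- effect of one removal on A's neighbour count
theorem adjF_set (g : List (List String)) (h w : Nat)
    (hlen : g.length = h) (hhead : (g.headD []).length = w)
    (hrows : ∀ i, i < h → w ≤ (g.getD i []).length)
    (r c : Nat) (hr : r < h) (hc : c < w) (hcell : (g.getD r []).getD c "" = "@")
    (a b : Nat) (l : List (Int × Int)) (acc : Int) :
    adjF (gset g r c ".") (a : Int) (b : Int) acc l =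
      adjF g (a : Int) (b : Int) acc l -
        (l.countP (fun dd => ((a : Int) + dd.1 == (r : Int)) && ((b : Int) + dd.2 == (c : Int))) : Int) := by
  induction l generalizing acc with
  | nil => simp [adjF]
  | cons dd l ih =>
    have hrow := hrows r hr
    simp only [adjF, List.foldl_cons, List.countP_cons]
    show adjF (gset g r c ".") _ _ _ l = adjF g _ _ _ l - _
    rw [ih]
    have hstep : (if 0 ≤ (a : Int) + dd.1 ∧ (a : Int) + dd.1 < ((gset g r c ".").length : Int) ∧
          0 ≤ (b : Int) + dd.2 ∧ (b : Int) + dd.2 < (((gset g r c ".").headD []).length : Int) then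
        (if ((gset g r c ".").getD ((a : Int) + dd.1).toNat []).getD ((b : Int) + dd.2).toNat "" = "@" then acc + 1 else acc)
      else acc)
      = (if 0 ≤ (a : Int) + dd.1 ∧ (a : Int) + dd.1 < (g.length : Int) ∧
          0 ≤ (b : Int) + dd.2 ∧ (b : Int) + dd.2 < ((g.headD []).length : Int) then
        (if (g.getD ((a : Int) + dd.1).toNat []).getD ((b : Int) + dd.2).toNat "" = "@" then acc + 1 else acc)
      else acc)
      - (if ((a : Int) + dd.1 == (r : Int)) && ((b : Int) + dd.2 == (c : Int)) then (1 : Int) else 0) := by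
      simp only [gset_length, gset_headD_len, getD2_gset, Bool.and_eq_true, beq_iff_eq,
        decide_eq_true_eq]
      by_cases hG : 0 ≤ (a : Int) + dd.1 ∧ (a : Int) + dd.1 < (g.length : Int) ∧
          0 ≤ (b : Int) + dd.2 ∧ (b : Int) + dd.2 < ((g.headD []).length : Int)
      · rw [if_pos hG, if_pos hG]
        by_cases hhit : (a : Int) + dd.1 = (r : Int) ∧ (b : Int) + dd.2 = (c : Int)
        · have e1 : ((a : Int) + dd.1).toNat = r := by omega
          have e2 : ((b : Int) + dd.2).toNat = c := by omega
          rw [e1, e2,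
            if_pos (show r = r ∧ c = c ∧ r < g.length ∧ c < (g.getD r []).length from
              ⟨rfl, rfl, by omega, by omega⟩),
            if_neg (show ¬(("." : String) = "@") by simp),
            if_pos hcell, if_pos hhit]
          ring
        · rw [if_neg (show ¬(((a : Int) + dd.1).toNat = r ∧ ((b : Int) + dd.2).toNat = c ∧
              r < g.length ∧ c < (g.getD r []).length) by omega),
            if_neg hhit, sub_zero]
      · rw [if_neg hG, if_neg hG,
          if_neg (show ¬((a : Int) + dd.1 = (r : Int) ∧ (b : Int) + dd.2 = (c : Int)) by omega),
          sub_zero]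
    rw [hstep, adjF_sub]
    push_cast
    split_ifs <;> push_cast <;> ring

theorem dirs_hit (r c a b : Nat) :
    (pyDirs.countP (fun dd => ((a : Int) + dd.1 == (r : Int)) && ((b : Int) + dd.2 == (c : Int)))) =
      if NbrP r c a b then 1 else 0 := by
  simp only [pyDirs, List.countP_cons, List.countP_nil, NbrP]
  simp only [Bool.and_eq_true, beq_iff_eq, decide_eq_true_eq]
  split_ifs <;> omega

theorem numAdj_set (g : List (List String)) (h w : Nat)
    (hlen : g.length = h) (hhead : (g.headD []).length = w)
    (hrows : ∀ i, i < h → w ≤ (g.getD i []).length)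
    (r c : Nat) (hr : r < h) (hc : c < w) (hcell : (g.getD r []).getD c "" = "@")
    (a b : Nat) :
    numAdjacentRolls (a : Int) (b : Int) (gset g r c ".") =
      numAdjacentRolls (a : Int) (b : Int) g - (if NbrP r c a b then 1 else 0) := by
  rw [numAdjacentRolls_eq_adjF, numAdjacentRolls_eq_adjF,
    adjF_set g h w hlen hhead hrows r c hr hc hcell a b pyDirs 0, dirs_hit]
  split_ifs <;> simp

-- ===== B-side lemmas =====

theorem altNbrs_mem (h w r c : Nat) (p : Int × Int) (hp : p ∈ altNbrs h w r c) :
    0 ≤ p.1 ∧ p.1 < (h : Int) ∧ 0 ≤ p.2 ∧ p.2 < (w : Int) := by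
  simp only [altNbrs, List.mem_map, List.mem_filter, decide_eq_true_eq] at hp
  obtain ⟨dd, ⟨-, hcond⟩, rfl⟩ := hp
  exact ⟨hcond.1, hcond.2.1, hcond.2.2.1, hcond.2.2.2⟩

theorem altDec_shape_len (cnt : List (List Int)) (ps : List (Int × Int)) :
    (altDec cnt ps).length = cnt.length := by
  induction ps generalizing cnt with
  | nil => rfl
  | cons p ps ih =>
    show (altDec (gset cnt p.1.toNat p.2.toNat ((cnt.getD p.1.toNat []).getD p.2.toNat 0 - 1)) ps).length = _
    rw [ih, gset_length]

theorem altDec_shape_row (cnt : List (List Int)) (ps : List (Int × Int)) (a : Nat) :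
    ((altDec cnt ps).getD a []).length = (cnt.getD a []).length := by
  induction ps generalizing cnt with
  | nil => rfl
  | cons p ps ih =>
    show ((altDec (gset cnt p.1.toNat p.2.toNat ((cnt.getD p.1.toNat []).getD p.2.toNat 0 - 1)) ps).getD a []).length = _
    rw [ih, gset_row_len]

theorem altDec_general (ps : List (Int × Int)) (m : List (List Int)) (h w : Nat)
    (hm : m.length = h)
    (hps : ∀ p ∈ ps, 0 ≤ p.1 ∧ p.1 < (h : Int) ∧ 0 ≤ p.2 ∧ p.2 < (w : Int))
    (hrow : ∀ i, i < h → w ≤ (m.getD i []).length)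
    (a b : Nat) :
    gget (altDec m ps) 0 a b = gget m 0 a b -
      (ps.countP (fun p => (p.1 == (a : Int)) && (p.2 == (b : Int))) : Int) := by
  induction ps generalizing m with
  | nil => simp [altDec]
  | cons p ps ih =>
    have hpb := hps p (List.mem_cons_self ..)
    have hps' : ∀ q ∈ ps, 0 ≤ q.1 ∧ q.1 < (h : Int) ∧ 0 ≤ q.2 ∧ q.2 < (w : Int) :=
      fun q hq => hps q (List.mem_cons_of_mem _ hq)
    simp only [altDec, List.foldl_cons, List.countP_cons]
    show gget (altDec (gset m p.1.toNat p.2.toNat (gget m 0 p.1.toNat p.2.toNat - 1)) ps) 0 a b = _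
    rw [ih _ (by rw [gset_length]; exact hm) hps'
      (fun i hi => by rw [gset_row_len]; exact hrow i hi), gget_gset]
    have hrw := hrow p.1.toNat (by omega)
    by_cases hh : a = p.1.toNat ∧ b = p.2.toNat
    · obtain ⟨rfl, rfl⟩ := hh
      rw [if_pos ⟨rfl, rfl, by omega, by omega⟩,
        if_pos (show (p.1 == ((p.1.toNat : Nat) : Int) && p.2 == ((p.2.toNat : Nat) : Int)) = true by
          simp only [Bool.and_eq_true, beq_iff_eq]; omega)]
      simp
      push_cast
      ring
    · rw [if_neg (by tauto),
        if_neg (show ¬((p.1 == (a : Int) && p.2 == (b : Int)) = true) by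
          simp only [Bool.and_eq_true, beq_iff_eq]; omega)]
      simp

theorem neigh_hit (r c a b : Nat) :
    (neighOffsets.countP (fun dd => ((r : Int) + dd.1 == (a : Int)) && ((c : Int) + dd.2 == (b : Int)))) =
      if NbrP r c a b then 1 else 0 := by
  simp only [neighOffsets, List.countP_cons, List.countP_nil, NbrP]
  simp only [Bool.and_eq_true, beq_iff_eq, decide_eq_true_eq]
  split_ifs <;> omega

theorem altNbrs_countP (h w r c a b : Nat) (hr : r < h) (hc : c < w) (ha : a < h) (hb : b < w) :
    ((altNbrs h w r c).countP (fun p => (p.1 == (a : Int)) && (p.2 == (b : Int)))) =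
      if NbrP r c a b then 1 else 0 := by
  rw [altNbrs, List.countP_map, List.countP_filter]
  rw [List.countP_congr ?_, neigh_hit r c a b]
  intro dd _
  simp only [Function.comp, Bool.and_eq_true, beq_iff_eq, decide_eq_true_eq]
  constructor
  · rintro ⟨⟨h1, h2⟩, -⟩; exact ⟨h1, h2⟩
  · rintro ⟨h1, h2⟩; exact ⟨⟨h1, h2⟩, by omega⟩

-- table entry after one removal
theorem altDec_get (cnt : List (List Int)) (h w : Nat)
    (hm : cnt.length = h) (hrow : ∀ i, i < h → w ≤ (cnt.getD i []).length)
    (r c : Nat) (hr : r < h) (hc : c < w) (a b : Nat) (ha : a < h) (hb : b < w) :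
    gget (altDec cnt (altNbrs h w r c)) 0 a b =
      gget cnt 0 a b - (if NbrP r c a b then 1 else 0) := by
  rw [altDec_general (altNbrs h w r c) cnt h w hm (fun p hp => altNbrs_mem h w r c p hp) hrow a b,
    altNbrs_countP h w r c a b hr hc ha hb]
  split_ifs <;> simp

-- initial table = A's neighbour counts
theorem altCnt_shape_len (g : List (List String)) (h w : Nat) : (altCnt g h w).length = h := by simp [altCnt]

theorem altCnt_shape_row (g : List (List String)) (h w a : Nat) (ha : a < h) :
    ((altCnt g h w).getD a []).length = w := by
  simp [altCnt, List.getD_eq_getElem?_getD, List.getElem?_map, List.getElem?_range, ha]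

theorem altCnt_get (g : List (List String)) (h w : Nat)
    (hlen : g.length = h) (hhead : (g.headD []).length = w)
    (a b : Nat) (ha : a < h) (hb : b < w) :
    gget (altCnt g h w) 0 a b = numAdjacentRolls (a : Int) (b : Int) g := by
  have hb' : gget (altCnt g h w) 0 a b =
      (((altNbrs h w a b).filter (fun p => (g.getD p.1.toNat []).getD p.2.toNat "" = "@")).length : Int) := by
    simp [altCnt, gget, List.getD_eq_getElem?_getD, List.getElem?_map, List.getElem?_range, ha, hb]
  rw [hb', numAdjacentRolls_eq_adjF, adjF_count, zero_add]
  congr 1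
  rw [← List.countP_eq_length_filter]
  simp only [altNbrs, List.countP_map, List.countP_filter, Function.comp]
  have hperm : pyDirs.Perm neighOffsets := by decide
  rw [hperm.countP_eq]
  apply List.countP_congr
  intro dd _
  simp only [hlen, hhead]
  rw [Bool.and_comm]

-- ===== invariant and the paired loops =====

def LoopInv (h w : Nat) (g : List (List String)) (cnt : List (List Int)) : Prop :=
  g.length = h ∧ (g.headD []).length = w ∧ (∀ i, i < h → w ≤ (g.getD i []).length) ∧
  cnt.length = h ∧ (∀ i, i < h → (cnt.getD i []).length = w) ∧
  (∀ a b, a < h → b < w → gget cnt 0 a b = numAdjacentRolls (a : Int) (b : Int) g)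

theorem inner_loop (h w : Nat) (r : Nat) (hr : r < h) (cs : List Nat) (hcs : ∀ c ∈ cs, c < w)
    (sA : List (List String) × Int) (sB : List (List String) × List (List Int) × Int)
    (hg : sA.1 = sB.1) (hn : sA.2 = sB.2.2) (hinv : LoopInv h w sB.1 sB.2.1) :
    ((cs.foldl (fun st (c : Nat) =>
      if (st.1.getD r []).getD c "" = "@" ∧ is_accessible (r : Int) (c : Int) st.1 then
        (st.1.set r ((st.1.getD r []).set c "."), st.2 + 1)
      else st) sA).1 = (cs.foldl (fun st (c : Nat) =>
      if (st.1.getD r []).getD c "" = "@" ∧ (st.2.1.getD r []).getD c 0 < 4 then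
        (st.1.set r ((st.1.getD r []).set c "."), altDec st.2.1 (altNbrs h w r c), st.2.2 + 1)
      else st) sB).1) ∧
    ((cs.foldl (fun st (c : Nat) =>
      if (st.1.getD r []).getD c "" = "@" ∧ is_accessible (r : Int) (c : Int) st.1 then
        (st.1.set r ((st.1.getD r []).set c "."), st.2 + 1)
      else st) sA).2 = (cs.foldl (fun st (c : Nat) =>
      if (st.1.getD r []).getD c "" = "@" ∧ (st.2.1.getD r []).getD c 0 < 4 then
        (st.1.set r ((st.1.getD r []).set c "."), altDec st.2.1 (altNbrs h w r c), st.2.2 + 1)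
      else st) sB).2.2) ∧
    LoopInv h w ((cs.foldl (fun st (c : Nat) =>
      if (st.1.getD r []).getD c "" = "@" ∧ (st.2.1.getD r []).getD c 0 < 4 then
        (st.1.set r ((st.1.getD r []).set c "."), altDec st.2.1 (altNbrs h w r c), st.2.2 + 1)
      else st) sB).1) ((cs.foldl (fun st (c : Nat) =>
      if (st.1.getD r []).getD c "" = "@" ∧ (st.2.1.getD r []).getD c 0 < 4 then
        (st.1.set r ((st.1.getD r []).set c "."), altDec st.2.1 (altNbrs h w r c), st.2.2 + 1)
      else st) sB).2.1) := by
  induction cs generalizing sA sB with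
  | nil => exact ⟨hg, hn, hinv⟩
  | cons c0 cs ih =>
    obtain ⟨gA, nA⟩ := sA
    obtain ⟨gB, cntB, nB⟩ := sB
    dsimp at hg hn hinv
    subst hg hn
    have hc0 : c0 < w := hcs c0 (List.mem_cons_self ..)
    have hcs' : ∀ c ∈ cs, c < w := fun x hx => hcs x (List.mem_cons_of_mem _ hx)
    obtain ⟨hlen, hhead, hrows, hclen, hcrow, hval⟩ := hinv
    have hcond : ((gA.getD r []).getD c0 "" = "@" ∧ is_accessible (r : Int) (c0 : Int) gA) ↔
        ((gA.getD r []).getD c0 "" = "@" ∧ (cntB.getD r []).getD c0 0 < 4) := by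
      have hv := hval r c0 hr hc0
      unfold gget at hv
      unfold is_accessible
      rw [hv]
      simp
    simp only [List.foldl_cons]
    by_cases hA : (gA.getD r []).getD c0 "" = "@" ∧ (cntB.getD r []).getD c0 0 < 4
    · rw [if_pos (hcond.mpr hA), if_pos hA]
      apply ih hcs' _ _ rfl rfl
      refine ⟨?_, ?_, ?_, ?_, ?_, ?_⟩
      · show (gset gA r c0 ".").length = h
        rw [gset_length]; exact hlen
      · show ((gset gA r c0 ".").headD []).length = w
        rw [gset_headD_len]; exact hhead
      · intro i hi
        show w ≤ ((gset gA r c0 ".").getD i []).length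
        rw [gset_row_len]; exact hrows i hi
      · show (altDec cntB (altNbrs h w r c0)).length = h
        rw [altDec_shape_len]; exact hclen
      · intro i hi
        show ((altDec cntB (altNbrs h w r c0)).getD i []).length = w
        rw [altDec_shape_row]; exact hcrow i hi
      · intro a b ha hb
        show gget (altDec cntB (altNbrs h w r c0)) 0 a b =
          numAdjacentRolls (a : Int) (b : Int) (gset gA r c0 ".")
        rw [altDec_get cntB h w hclen (fun i hi => le_of_eq (hcrow i hi).symm) r c0 hr hc0 a b ha hb,
          numAdj_set gA h w hlen hhead hrows r c0 hr hc0 hA.1 a b]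
        have := hval a b ha hb
        unfold gget at this ⊢
        rw [this]
    · rw [if_neg (fun hx => hA (hcond.mp hx)), if_neg hA]
      exact ih hcs' _ _ rfl rfl ⟨hlen, hhead, hrows, hclen, hcrow, hval⟩

theorem outer_loop (h w : Nat) (rs : List Nat) (hrs : ∀ r ∈ rs, r < h)
    (sA : List (List String) × Int) (sB : List (List String) × List (List Int) × Int)
    (hg : sA.1 = sB.1) (hn : sA.2 = sB.2.2) (hinv : LoopInv h w sB.1 sB.2.1) :
    ((rs.foldl (fun st (r : Nat) =>
      (List.range (st.1.headD []).length).foldl (fun st (c : Nat) =>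
        if (st.1.getD r []).getD c "" = "@" ∧ is_accessible (r : Int) (c : Int) st.1 then
          (st.1.set r ((st.1.getD r []).set c "."), st.2 + 1)
        else st) st) sA).1 = (rs.foldl (fun st (r : Nat) =>
      (List.range w).foldl (fun st (c : Nat) =>
        if (st.1.getD r []).getD c "" = "@" ∧ (st.2.1.getD r []).getD c 0 < 4 then
          (st.1.set r ((st.1.getD r []).set c "."), altDec st.2.1 (altNbrs h w r c), st.2.2 + 1)
        else st) st) sB).1) ∧
    ((rs.foldl (fun st (r : Nat) =>
      (List.range (st.1.headD []).length).foldl (fun st (c : Nat) =>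
        if (st.1.getD r []).getD c "" = "@" ∧ is_accessible (r : Int) (c : Int) st.1 then
          (st.1.set r ((st.1.getD r []).set c "."), st.2 + 1)
        else st) st) sA).2 = (rs.foldl (fun st (r : Nat) =>
      (List.range w).foldl (fun st (c : Nat) =>
        if (st.1.getD r []).getD c "" = "@" ∧ (st.2.1.getD r []).getD c 0 < 4 then
          (st.1.set r ((st.1.getD r []).set c "."), altDec st.2.1 (altNbrs h w r c), st.2.2 + 1)
        else st) st) sB).2.2) := by
  induction rs generalizing sA sB with
  | nil => exact ⟨hg, hn⟩
  | cons r0 rs ih =>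
    have hr0 : r0 < h := hrs r0 (List.mem_cons_self ..)
    have hrs' : ∀ x ∈ rs, x < h := fun x hx => hrs x (List.mem_cons_of_mem _ hx)
    simp only [List.foldl_cons]
    have hwidth : (sA.1.headD []).length = w := by rw [hg]; exact hinv.2.1
    rw [hwidth]
    have hstep := inner_loop h w r0 hr0 (List.range w) (fun c hcm => List.mem_range.mp hcm)
      sA sB hg hn hinv
    exact ih hrs' _ _ hstep.1 hstep.2.1 hstep.2.2

-- ===== VERDICT (by name: the statement is the Claim_ definition above) =====
theorem remove_accessible_rows_and_return_count_spec : Claim_equal_remove_accessible_rows_and_return_count := by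
  intro grid _ hpre
  unfold Spec_remove_accessible_rows_and_return_count
  unfold remove_accessible_rows_and_return_count remove_accessible_rows_and_return_count_alt
  by_cases hempty : grid = []
  · subst hempty
    rfl
  · rw [if_neg hempty]
    have hrows : ∀ i, i < grid.length → (grid.headD []).length ≤ (grid.getD i []).length := by
      intro i hi
      have hmem : grid.getD i [] ∈ grid := by
        rw [List.getD_eq_getElem grid [] hi]
        exact List.getElem_mem hi
      exact hpre _ hmem
    have hinv0 : LoopInv grid.length (grid.headD []).length grid
        (altCnt grid grid.length (grid.headD []).length) := by
      refine ⟨rfl, rfl, hrows, altCnt_shape_len _ _ _, ?_, ?_⟩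
      · intro i hi
        exact altCnt_shape_row grid grid.length (grid.headD []).length i hi
      · intro a b ha hb
        exact altCnt_get grid grid.length (grid.headD []).length rfl rfl a b ha hb
    have h0 := outer_loop grid.length (grid.headD []).length (List.range grid.length)
      (fun r hrm => List.mem_range.mp hrm) (grid, 0)
      (grid, altCnt grid grid.length (grid.headD []).length, 0) rfl rfl hinv0
    exact Prod.ext h0.1 h0.2
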